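-- pv_equiv track=rewrite | github.com/bfortuner/problems | arrays/python/max_sum_3.py | max_sum_3_loops
-- ===== SOURCE A (Python) =====
-- def max_sum_3_loops(arr):
-- 	if len(arr) < 3:
-- 		raise Exception("Array size less than 3!")
-- 	max_sum = sum(arr[:3])
-- 	for i in range(len(arr)-2):
-- 		for j in range(i+1, len(arr)-1):
-- 			for k in range(j+1, len(arr)):
-- 				cur_sum = arr[i] + arr[j] + arr[k]
-- 				max_sum = max(cur_sum, max_sum)
-- 	return max_sum
-- ===== SOURCE B (Python) =====
-- def max_sum_3_loops(arr):
--     if len(arr) < 3: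
--         raise Exception("Array size less than 3!")
--     b1 = b2 = b3 = None  # best single / pair / triple sum seen so far
--     for x in arr:
--         if b2 is not None:
--             b3 = b2 + x if b3 is None else max(b3, b2 + x)
--         if b1 is not None:
--             b2 = b1 + x if b2 is None else max(b2, b1 + x)
--         b1 = x if b1 is None else max(b1, x)
--     return b3
-- ===== Notes on version B (the rewrite author's own statement) =====
-- stated objective: faster
-- what changed: Replaced the O(n^3) triple-nested index loop with a single forward pass that maintains the best single element, best pair sum and best triple sum of the prefix seen so far.
import Mathlib
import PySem

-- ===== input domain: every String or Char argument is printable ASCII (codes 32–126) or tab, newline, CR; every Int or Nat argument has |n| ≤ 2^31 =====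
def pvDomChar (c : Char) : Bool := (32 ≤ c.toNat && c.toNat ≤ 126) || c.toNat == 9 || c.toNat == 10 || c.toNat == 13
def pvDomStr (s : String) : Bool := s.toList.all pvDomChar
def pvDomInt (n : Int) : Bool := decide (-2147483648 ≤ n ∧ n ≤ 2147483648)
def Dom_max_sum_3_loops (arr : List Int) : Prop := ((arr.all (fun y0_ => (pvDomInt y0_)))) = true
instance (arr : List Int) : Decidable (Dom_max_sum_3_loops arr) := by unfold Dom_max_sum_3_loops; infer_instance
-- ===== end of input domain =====

-- B replaces A's triple-nested index loop by one forward pass keeping the best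
-- single element, best pair sum and best triple sum of the prefix seen so far.

-- ===== PORT A =====
def max_sum_3_loops (arr : List Int) : Int :=
  if arr.length < 3 then 0  -- Python raises Exception here; excluded by Pre_
  else
    let n : Int := arr.length
    let max_sum := (PySem.List.slice arr none (some 3)).sum
    (PySem.List.pyRange 0 (n - 2) 1).foldl (fun ms i =>
      (PySem.List.pyRange (i + 1) (n - 1) 1).foldl (fun ms j =>
        (PySem.List.pyRange (j + 1) n 1).foldl (fun ms k =>
          max (PySem.List.pyGetD arr i 0 + PySem.List.pyGetD arr j 0 + PySem.List.pyGetD arr k 0) ms)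
          ms) ms) max_sum

-- ===== PORT B =====
-- one loop iteration of Source B: update (b1, b2, b3) with the next element x
def pvStep (s : Option Int × Option Int × Option Int) (x : Int) :
    Option Int × Option Int × Option Int :=
  let b3 : Option Int :=
    match s.2.1, s.2.2 with
    | some p, none   => some (p + x)
    | some p, some t => some (max t (p + x))
    | none,   t      => t
  let b2 : Option Int :=
    match s.1, s.2.1 with
    | some o, none   => some (o + x)
    | some o, some p => some (max p (o + x))
    | none,   p      => p
  let b1 : Option Int :=
    match s.1 with
    | none   => some x
    | some o => some (max o x)
  (b1, b2, b3)

def max_sum_3_loops_alt (arr : List Int) : Int :=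
  if arr.length < 3 then 0  -- Python raises Exception here; excluded by Pre_
  else ((arr.foldl pvStep (none, none, none)).2.2).getD 0

-- ===== PRECONDITION & SPEC =====
-- Python A (and B) raise 'Array size less than 3!' on shorter input
def Pre_max_sum_3_loops (arr : List Int) : Prop := 3 ≤ arr.length
instance (arr : List Int) : Decidable (Pre_max_sum_3_loops arr) := by
  unfold Pre_max_sum_3_loops; infer_instance
def pvWitness_max_sum_3_loops : List Int := [1, 2, 3]

def Spec_max_sum_3_loops (arr : List Int) (out : Int) : Prop := out = max_sum_3_loops_alt arr
instance (arr : List Int) (out : Int) : Decidable (Spec_max_sum_3_loops arr out) := by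
  unfold Spec_max_sum_3_loops; infer_instance

-- ===== CLAIM (what is proved, stated in full; the proofs are below) =====
def Claim_equal_max_sum_3_loops : Prop := ∀ (arr : List Int), Dom_max_sum_3_loops arr → Pre_max_sum_3_loops arr → Spec_max_sum_3_loops arr (max_sum_3_loops arr)

-- ===== LEMMAS AND PROOFS =====

-- sums of all k-element (index-)subsets of xs, first-k sum in front
def subsums : Nat → List Int → List Int
  | 0, _ => [0]
  | _ + 1, [] => []
  | k + 1, x :: xs => (subsums k xs).map (fun s => x + s) ++ subsums (k + 1) xs

-- max of two optional values (none = absent)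
def omax : Option Int → Option Int → Option Int
  | none, b => b
  | a, none => a
  | some u, some v => some (max u v)

lemma foldl_max_omax (l : List Int) (a : Int) :
    some (l.foldl max a) = omax (some a) l.max? := by
  induction l generalizing a with
  | nil => rfl
  | cons y t ih =>
    simp only [List.foldl_cons, List.max?_cons', ih]
    cases h : t.max? <;> simp [omax, max_assoc]

lemma max?_append (l1 l2 : List Int) : (l1 ++ l2).max? = omax l1.max? l2.max? := by
  rcases l1 with _ | ⟨x, t⟩
  · rfl
  · simp only [List.cons_append, List.max?_cons', List.foldl_append]
    rw [foldl_max_omax]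

lemma foldl_max_map_addl (t : List Int) (x : Int) : ∀ a : Int,
    (t.map (fun s => x + s)).foldl max (x + a) = x + t.foldl max a := by
  induction t with
  | nil => intro a; rfl
  | cons b t ih =>
    intro a
    simp only [List.map_cons, List.foldl_cons]
    rw [max_add_add_left]
    exact ih (max a b)

lemma max?_map_addl (l : List Int) (x : Int) :
    (l.map (fun s => x + s)).max? = l.max?.map (fun s => x + s) := by
  rcases l with _ | ⟨a, t⟩
  · rfl
  · simp only [List.map_cons, List.max?_cons', foldl_max_map_addl, Option.map_some]

lemma max?_subsums_snoc (p : List Int) (x : Int) : ∀ k : Nat,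
    (subsums (k + 1) (p ++ [x])).max? =
      omax (subsums (k + 1) p).max? ((subsums k p).max?.map (fun s => s + x)) := by
  induction p with
  | nil =>
    intro k
    cases k with
    | zero => simp [subsums, omax]
    | succ k => simp [subsums, omax]
  | cons y p' ih =>
    intro k
    cases k with
    | zero =>
      simp only [subsums, List.cons_append, max?_append, max?_map_addl, ih 0]
      cases h : (subsums 1 p').max? <;> simp [omax]
    | succ k =>
      simp only [subsums, List.cons_append, max?_append, max?_map_addl,
        ih k, ih (k + 1)]
      cases h1 : (subsums k p').max? <;> cases h2 : (subsums (k + 1) p').max? <;>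
        cases h3 : (subsums (k + 2) p').max? <;>
        simp [omax] <;> omega

-- the loop of B computes the best 1-, 2- and 3-subset sums of the prefix
lemma foldl_pvStep (p : List Int) :
    p.foldl pvStep (none, none, none) =
      ((subsums 1 p).max?, (subsums 2 p).max?, (subsums 3 p).max?) := by
  induction p using List.reverseRecOn with
  | nil => rfl
  | append_singleton p x ih =>
    rw [List.foldl_append, List.foldl_cons, List.foldl_nil, ih]
    have h1 := max?_subsums_snoc p x 0
    have h2 := max?_subsums_snoc p x 1
    have h3 := max?_subsums_snoc p x 2
    simp only [subsums] at h1
    rw [h1, h2, h3]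
    cases hm1 : (subsums 1 p).max? <;> cases hm2 : (subsums 2 p).max? <;>
      cases hm3 : (subsums 3 p).max? <;>
      simp [pvStep, omax, max_comm]

-- structural (index-free) forms of A's three nested loops
def innerL (xs : List Int) (c m : Int) : Int := xs.foldl (fun acc v => max (c + v) acc) m
def pairL : List Int → Int → Int → Int
  | [], _, m => m
  | y :: ys, c, m => pairL ys c (innerL ys (c + y) m)
def tripL : List Int → Int → Int
  | [], m => m
  | y :: ys, m => tripL ys (pairL ys y m)

lemma subsums_one (xs : List Int) : subsums 1 xs = xs := by
  induction xs with
  | nil => rfl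
  | cons x xs ih => simp [subsums, ih]

lemma pairL_eq (xs : List Int) : ∀ c m : Int,
    pairL xs c m = (subsums 2 xs).foldl (fun acc s => max (c + s) acc) m := by
  induction xs with
  | nil => intro c m; rfl
  | cons y ys ih =>
    intro c m
    simp only [pairL, subsums, List.foldl_append, List.foldl_map, ih, subsums_one]
    congr 1
    · unfold innerL
      apply PySem.List.foldl_congr_mem
      intro acc s _
      congr 1
      ring

lemma tripL_eq (xs : List Int) : ∀ m : Int,
    tripL xs m = (subsums 3 xs).foldl (fun acc s => max s acc) m := by
  induction xs with
  | nil => intro m; rfl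
  | cons y ys ih =>
    intro m
    simp only [tripL, subsums, List.foldl_append, List.foldl_map, ih, pairL_eq]

-- shifting a range(a+1, b+1) loop down to range(a, b)
lemma foldl_pyRange_shift (f : Int → Int → Int) (a b m : Int) :
    (PySem.List.pyRange (a + 1) (b + 1) 1).foldl f m =
      (PySem.List.pyRange a b 1).foldl (fun acc t => f acc (t + 1)) m := by
  rw [PySem.List.pyRange_one a b, PySem.List.pyRange_one (a + 1) (b + 1)]
  have h : b + 1 - (a + 1) = b - a := by ring
  rw [h, List.foldl_map, List.foldl_map]
  apply PySem.List.foldl_congr_mem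
  intro acc k _
  congr 1
  ring

lemma pyGetD_cons_succ (x : Int) (xs : List Int) (i : Int) (h : 0 ≤ i) :
    PySem.List.pyGetD (x :: xs) (i + 1) 0 = PySem.List.pyGetD xs i 0 := by
  lift i to Nat using h
  have h1 : ((i : Int) + 1) = ((i + 1 : Nat) : Int) := by push_cast; ring
  rw [h1, PySem.List.pyGetD_natCast, PySem.List.pyGetD_natCast]
  rfl

lemma pyGetD_zero_cons (y : Int) (ys : List Int) :
    PySem.List.pyGetD (y :: ys) (0 : Int) 0 = y := by
  rw [show (0:Int) = ((0:Nat):Int) from rfl, PySem.List.pyGetD_natCast]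
  rfl

lemma loopI_eq (xs : List Int) (c m : Int) :
    (PySem.List.pyRange 0 (xs.length : Int) 1).foldl
      (fun ms k => max (c + PySem.List.pyGetD xs k 0) ms) m = innerL xs c m :=
  PySem.List.foldl_pyRange_zero_pyGetD' xs 0 (fun acc v => max (c + v) acc) m

-- A's inner double loop over y :: ys starting at j = 1, shifted down onto ys
lemma pairShift (y c : Int) (ys : List Int) (ms : Int) :
    (PySem.List.pyRange (0 + 1) ((ys.length : Int)) 1).foldl (fun ms j =>
      (PySem.List.pyRange (j + 1) ((ys.length : Int) + 1) 1).foldl (fun ms k =>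
        max (c + PySem.List.pyGetD (y :: ys) j 0 + PySem.List.pyGetD (y :: ys) k 0) ms) ms) ms
    = (PySem.List.pyRange 0 ((ys.length : Int) - 1) 1).foldl (fun ms j =>
      (PySem.List.pyRange (j + 1) (ys.length : Int) 1).foldl (fun ms k =>
        max (c + PySem.List.pyGetD ys j 0 + PySem.List.pyGetD ys k 0) ms) ms) ms := by
  rw [show (ys.length : Int) = ((ys.length : Int) - 1) + 1 from by ring, foldl_pyRange_shift]
  rw [show ((ys.length : Int) - 1) + 1 = (ys.length : Int) from by ring]
  apply PySem.List.foldl_congr_mem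
  intro acc t ht
  have h0t : 0 ≤ t := (PySem.List.mem_pyRange_one.mp ht).1
  rw [pyGetD_cons_succ _ _ _ h0t]
  rw [foldl_pyRange_shift]
  apply PySem.List.foldl_congr_mem
  intro acc2 k hk
  have h0k : 0 ≤ k := le_trans (by omega) (PySem.List.mem_pyRange_one.mp hk).1
  rw [pyGetD_cons_succ _ _ _ h0k]

lemma loopP_eq (xs : List Int) : ∀ c m : Int,
    (PySem.List.pyRange 0 ((xs.length : Int) - 1) 1).foldl (fun ms j =>
      (PySem.List.pyRange (j + 1) (xs.length : Int) 1).foldl (fun ms k =>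
        max (c + PySem.List.pyGetD xs j 0 + PySem.List.pyGetD xs k 0) ms) ms) m
      = pairL xs c m := by
  induction xs with
  | nil =>
    intro c m
    rw [PySem.List.pyRange_one_eq_nil (by norm_num)]
    rfl
  | cons y ys ih =>
    intro c m
    by_cases hn : ys.length = 0
    · rcases List.length_eq_zero_iff.mp hn with rfl
      norm_num [PySem.List.pyRange_one_eq_nil]
      rfl
    · have hpos : 0 < (ys.length : Int) := by exact_mod_cast Nat.pos_of_ne_zero hn
      have hlen : (((y :: ys).length : Nat) : Int) = (ys.length : Int) + 1 := by
        push_cast [List.length_cons]; ring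
      simp only [hlen, add_sub_cancel_right]
      rw [PySem.List.pyRange_one_cons hpos, List.foldl_cons]
      simp only [pyGetD_zero_cons]
      have hinit : (PySem.List.pyRange (0 + 1) ((ys.length : Int) + 1) 1).foldl
          (fun ms k => max (c + y + PySem.List.pyGetD (y :: ys) k 0) ms) m
          = innerL ys (c + y) m := by
        rw [foldl_pyRange_shift]
        refine Eq.trans (PySem.List.foldl_congr_mem _ _ _ _ ?_) (loopI_eq ys (c + y) m)
        intro acc t ht
        rw [pyGetD_cons_succ _ _ _ (PySem.List.mem_pyRange_one.mp ht).1]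
      rw [hinit, pairShift, ih]
      rfl

-- degenerate inputs: with fewer than three elements the loops contribute nothing
lemma tripL_short (xs : List Int) (h : xs.length ≤ 2) : ∀ m : Int, tripL xs m = m := by
  rcases xs with _ | ⟨a, _ | ⟨b, _ | ⟨c, t⟩⟩⟩
  · intro m; rfl
  · intro m; rfl
  · intro m; rfl
  · simp at h

-- A's full triple loop over y :: ys starting at i = 1, shifted down onto ys
lemma tripShift (y : Int) (ys : List Int) (m : Int) :
    (PySem.List.pyRange (0 + 1) ((ys.length : Int) - 1) 1).foldl (fun ms i =>
      (PySem.List.pyRange (i + 1) (ys.length : Int) 1).foldl (fun ms j =>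
        (PySem.List.pyRange (j + 1) ((ys.length : Int) + 1) 1).foldl (fun ms k =>
          max (PySem.List.pyGetD (y :: ys) i 0 + PySem.List.pyGetD (y :: ys) j 0 +
            PySem.List.pyGetD (y :: ys) k 0) ms) ms) ms) m
    = (PySem.List.pyRange 0 ((ys.length : Int) - 2) 1).foldl (fun ms i =>
      (PySem.List.pyRange (i + 1) ((ys.length : Int) - 1) 1).foldl (fun ms j =>
        (PySem.List.pyRange (j + 1) (ys.length : Int) 1).foldl (fun ms k =>
          max (PySem.List.pyGetD ys i 0 + PySem.List.pyGetD ys j 0 +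
            PySem.List.pyGetD ys k 0) ms) ms) ms) m := by
  rw [show (ys.length : Int) - 1 = ((ys.length : Int) - 2) + 1 from by ring, foldl_pyRange_shift]
  rw [show ((ys.length : Int) - 2) + 1 = (ys.length : Int) - 1 from by ring]
  apply PySem.List.foldl_congr_mem
  intro acc i hi
  have h0i : 0 ≤ i := (PySem.List.mem_pyRange_one.mp hi).1
  rw [pyGetD_cons_succ _ _ _ h0i]
  rw [show (ys.length : Int) = ((ys.length : Int) - 1) + 1 from by ring, foldl_pyRange_shift]
  rw [show ((ys.length : Int) - 1) + 1 = (ys.length : Int) from by ring]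
  apply PySem.List.foldl_congr_mem
  intro acc2 j hj
  have h0j : 0 ≤ j := le_trans (by omega) (PySem.List.mem_pyRange_one.mp hj).1
  rw [pyGetD_cons_succ _ _ _ h0j]
  rw [foldl_pyRange_shift]
  apply PySem.List.foldl_congr_mem
  intro acc3 k hk
  have h0k : 0 ≤ k := le_trans (by omega) (PySem.List.mem_pyRange_one.mp hk).1
  rw [pyGetD_cons_succ _ _ _ h0k]

lemma loopA_eq (xs : List Int) : ∀ m : Int,
    (PySem.List.pyRange 0 ((xs.length : Int) - 2) 1).foldl (fun ms i =>
      (PySem.List.pyRange (i + 1) ((xs.length : Int) - 1) 1).foldl (fun ms j =>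
        (PySem.List.pyRange (j + 1) (xs.length : Int) 1).foldl (fun ms k =>
          max (PySem.List.pyGetD xs i 0 + PySem.List.pyGetD xs j 0 +
            PySem.List.pyGetD xs k 0) ms) ms) ms) m = tripL xs m := by
  induction xs with
  | nil =>
    intro m
    rw [PySem.List.pyRange_one_eq_nil (by norm_num)]
    rfl
  | cons y ys ih =>
    intro m
    by_cases hn : ys.length ≤ 1
    · rw [PySem.List.pyRange_one_eq_nil (by
        have : ((y :: ys).length : Int) ≤ 2 := by
          push_cast [List.length_cons]; omega
        omega)]
      rw [tripL_short _ (by simpa using hn) m]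
      rfl
    · have hpos : 0 < (ys.length : Int) - 1 := by
        have : 2 ≤ ys.length := by omega
        have : (2 : Int) ≤ (ys.length : Int) := by exact_mod_cast this
        omega
      have hlen : (((y :: ys).length : Nat) : Int) = (ys.length : Int) + 1 := by
        push_cast [List.length_cons]; ring
      simp only [hlen, add_sub_cancel_right]
      rw [show (ys.length : Int) + 1 - 2 = (ys.length : Int) - 1 from by ring]
      rw [PySem.List.pyRange_one_cons hpos, List.foldl_cons]
      simp only [pyGetD_zero_cons]
      rw [pairShift, loopP_eq, tripShift, ih]
      rfl

-- ===== VERDICT (by name: the statement is the Claim_ definition above) =====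
theorem max_sum_3_loops_spec : Claim_equal_max_sum_3_loops := by
  intro arr _hdom hpre
  unfold Pre_max_sum_3_loops at hpre
  unfold Spec_max_sum_3_loops max_sum_3_loops max_sum_3_loops_alt
  rw [if_neg (by omega), if_neg (by omega)]
  rw [loopA_eq, tripL_eq, foldl_pvStep]
  rcases arr with _ | ⟨a, _ | ⟨b, _ | ⟨c, r⟩⟩⟩ <;> simp at hpre
  have hhead : (subsums 3 (a :: b :: c :: r)).head? = some (a + (b + c)) := by
    simp [subsums]
  have hS : (PySem.List.slice (a :: b :: c :: r) none (some 3)).sum = a + (b + c) := by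
    rw [show (3:Int) = ((3:Nat):Int) from rfl, PySem.List.slice_to_natCast]
    simp
  cases hcons : subsums 3 (a :: b :: c :: r) with
  | nil => rw [hcons] at hhead; simp at hhead
  | cons h t =>
    rw [hcons] at hhead
    simp only [List.head?_cons, Option.some.injEq] at hhead
    subst hhead
    rw [hS, List.foldl_cons, max_self, List.max?_cons']
    show List.foldl (fun acc s => max s acc) (a + (b + c)) t = List.foldl max (a + (b + c)) t
    exact PySem.List.foldl_congr_mem _ _ _ _ (fun acc s _ => max_comm s acc)
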